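-- pv_equiv track=rewrite | github.com/zhuzhu94854693/UKUQ | UKUQ/step7_select.py | find_nearest_indices
-- ===== SOURCE A (Python) =====
-- def find_nearest_indices(data):
--     # 首先对数据进行排序
--     sorted_data = sorted(data)
--
--     # 初始化最小差距和对应的行号对
--     min_diff_sum = float('inf')
--     nearest_indices = (sorted_data[0], sorted_data[1], sorted_data[2])
--
--     # 遍历所有组合，计算差的绝对值之和
--     for i in range(len(sorted_data) - 2):
--         for j in range(i + 1, len(sorted_data) - 1):
--             for k in range(j + 1, len(sorted_data)):
--                 diff_sum = abs(sorted_data[i] - sorted_data[j]) + abs(sorted_data[j] - sorted_data[k]) + abs(sorted_data[i] - sorted_data[k])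
--                 if diff_sum < min_diff_sum:
--                     min_diff_sum = diff_sum
--                     nearest_indices = (sorted_data[i], sorted_data[j], sorted_data[k])
--
--     return nearest_indices  # 返回差值最接近0的行号对
-- ===== SOURCE B (Python) =====
-- def find_nearest_indices(data):
--     # Sort once; on a sorted list the pairwise-abs sum of a triple i<j<k is
--     # 2*(s[k]-s[i]), so the best triple is a consecutive window: scan windows,
--     # keeping the first window of strictly smallest span.
--     s = sorted(data)
--     best_i = 0
--     best_span = s[2] - s[0]
--     for i in range(1, len(s) - 2):
--         span = s[i + 2] - s[i]
--         if span < best_span: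
--             best_span = span
--             best_i = i
--     return (s[best_i], s[best_i + 1], s[best_i + 2])
-- ===== Notes on version B (the rewrite author's own statement) =====
-- stated objective: faster
-- what changed: Replaces the O(n^3) triple loop over all i<j<k with a sort plus a single linear scan over consecutive windows sorted[i..i+2], picking the first window of smallest span (equal because on a sorted list the pairwise-abs sum is 2*(s[k]-s[i]) and strict-< update keeps the first minimizer).
import Mathlib
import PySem

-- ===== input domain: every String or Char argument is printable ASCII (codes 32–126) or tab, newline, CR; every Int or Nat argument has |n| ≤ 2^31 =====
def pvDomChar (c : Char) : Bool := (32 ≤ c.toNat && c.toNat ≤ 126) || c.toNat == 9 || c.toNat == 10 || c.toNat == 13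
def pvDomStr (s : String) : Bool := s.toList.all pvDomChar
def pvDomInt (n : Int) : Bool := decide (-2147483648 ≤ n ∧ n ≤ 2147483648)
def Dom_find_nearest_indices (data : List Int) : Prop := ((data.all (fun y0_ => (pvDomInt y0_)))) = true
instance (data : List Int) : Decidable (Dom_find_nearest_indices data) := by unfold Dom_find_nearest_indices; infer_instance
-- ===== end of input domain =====

-- B replaces A's O(n^3) triple loop with a sort plus one linear scan over consecutive windows (faster, asymptotic).


-- ===== PORT A =====
-- sorted_data[i] for an index known to be in range (guaranteed by Pre_ and the loop bounds);
-- the `getD … 0` default is only a totality guard, never reached on Pre_.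
def pvGet (s : List Int) (i : Nat) : Int := s.getD i 0

-- diff_sum = abs(s[i]-s[j]) + abs(s[j]-s[k]) + abs(s[i]-s[k])
def pvDiff (s : List Int) (i j k : Nat) : Int :=
  |pvGet s i - pvGet s j| + |pvGet s j - pvGet s k| + |pvGet s i - pvGet s k|

-- state: (min_diff_sum, nearest_indices); none models float('inf')
def pvStepK (s : List Int) (i j : Nat) (st : Option Int × List Int) (k : Nat) :
    Option Int × List Int :=
  match st.1 with
  | none => (some (pvDiff s i j k), [pvGet s i, pvGet s j, pvGet s k])
  | some m =>
      if pvDiff s i j k < m then (some (pvDiff s i j k), [pvGet s i, pvGet s j, pvGet s k])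
      else st

-- for k in range(j+1, len(s))
def pvInnerK (s : List Int) (i j : Nat) (st : Option Int × List Int) : Option Int × List Int :=
  (List.range' (j + 1) (s.length - (j + 1))).foldl (pvStepK s i j) st

-- for j in range(i+1, len(s)-1)
def pvInnerJ (s : List Int) (i : Nat) (st : Option Int × List Int) : Option Int × List Int :=
  (List.range' (i + 1) (s.length - 1 - (i + 1))).foldl (fun st j => pvInnerK s i j st) st

def find_nearest_indices (data : List Int) : List Int :=
  let s := PySem.List.sorted data (fun x => x) false
  ((List.range (s.length - 2)).foldl (fun st i => pvInnerJ s i st)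
      (none, [pvGet s 0, pvGet s 1, pvGet s 2])).2

-- ===== PORT B =====
-- span = s[i+2] - s[i]
def pvSpan (s : List Int) (i : Nat) : Int := pvGet s (i + 2) - pvGet s i

-- loop body: keep the first window of strictly smallest span; state (best_span, best_i)
def pvStepB (s : List Int) (st : Int × Nat) (i : Nat) : Int × Nat :=
  if pvSpan s i < st.1 then (pvSpan s i, i) else st

def find_nearest_indices_alt (data : List Int) : List Int :=
  let s := PySem.List.sorted data (fun x => x) false
  let b := (List.range' 1 (s.length - 2 - 1)).foldl (pvStepB s) (pvSpan s 0, 0)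
  [pvGet s b.2, pvGet s (b.2 + 1), pvGet s (b.2 + 2)]

-- ===== PRECONDITION & SPEC =====
-- Pre_: with fewer than 3 elements both the Python A and B raise IndexError.
def Pre_find_nearest_indices (data : List Int) : Prop := 3 ≤ data.length
instance (data : List Int) : Decidable (Pre_find_nearest_indices data) := by
  unfold Pre_find_nearest_indices; infer_instance

def pvWitness_find_nearest_indices : List Int := [4, 1, 9, 2]

def Spec_find_nearest_indices (data : List Int) (out : List Int) : Prop := out = find_nearest_indices_alt data
instance (data : List Int) (out : List Int) : Decidable (Spec_find_nearest_indices data out) := by unfold Spec_find_nearest_indices; infer_instance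

-- ===== CLAIM (what is proved, stated in full; the proofs are below) =====
def Claim_equal_find_nearest_indices : Prop := ∀ (data : List Int), Dom_find_nearest_indices data → Pre_find_nearest_indices data → Spec_find_nearest_indices data (find_nearest_indices data)

-- ===== LEMMAS AND PROOFS =====

-- monotone access into the sorted list
theorem pvGet_mono {s : List Int} (hs : s.Pairwise (· ≤ ·)) {a b : Nat}
    (hab : a ≤ b) (hb : b < s.length) : pvGet s a ≤ pvGet s b := by
  have ha : a < s.length := lt_of_le_of_lt hab hb
  have h1 : pvGet s a = s[a] := by simp [pvGet, List.getD_eq_getElem?_getD, ha]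
  have h2 : pvGet s b = s[b] := by simp [pvGet, List.getD_eq_getElem?_getD, hb]
  rw [h1, h2]
  rcases Nat.eq_or_lt_of_le hab with h | h
  · subst h; exact le_refl _
  · exact List.pairwise_iff_getElem.mp hs a b ha hb h

theorem pvDiff_eq {s : List Int} (hs : s.Pairwise (· ≤ ·)) {i j k : Nat}
    (hij : i ≤ j) (hjk : j ≤ k) (hk : k < s.length) :
    pvDiff s i j k = 2 * (pvGet s k - pvGet s i) := by
  have h1 := pvGet_mono hs hij (lt_of_le_of_lt hjk hk)
  have h2 := pvGet_mono hs hjk hk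
  unfold pvDiff
  rw [abs_of_nonpos (by omega), abs_of_nonpos (by omega), abs_of_nonpos (by omega)]
  ring

theorem foldK_const (s : List Int) (i j : Nat) (K : List Nat) (m : Int) (t : List Int)
    (hall : ∀ k ∈ K, m ≤ pvDiff s i j k) :
    K.foldl (pvStepK s i j) (some m, t) = (some m, t) := by
  induction K with
  | nil => rfl
  | cons k K ih =>
      have hk := hall k (by simp)
      have : pvStepK s i j (some m, t) k = (some m, t) := by
        simp [pvStepK, not_lt.mpr hk]
      simp only [List.foldl_cons, this]
      exact ih (fun k hk => hall k (by simp [hk]))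

-- pvInnerK at j = i+1: only the first k = i+2 can update; later k have pvDiff ≥ 2*span i
theorem innerK_first {s : List Int} (hs : s.Pairwise (· ≤ ·)) {i : Nat} (hi : i + 2 < s.length)
    (m : Int) (t : List Int) :
    pvInnerK s i (i + 1) (some m, t) =
      if 2 * pvSpan s i < m then
        (some (2 * pvSpan s i), [pvGet s i, pvGet s (i + 1), pvGet s (i + 2)])
      else (some m, t) := by
  have hlen : s.length - (i + 1 + 1) = (s.length - (i + 3)) + 1 := by omega
  have hd : pvDiff s i (i + 1) (i + 2) = 2 * pvSpan s i := by
    rw [pvDiff_eq hs (by omega) (by omega) hi]; rfl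
  have hge : ∀ kk ∈ List.range' (i + 3) (s.length - (i + 3)),
      2 * pvSpan s i ≤ pvDiff s i (i + 1) kk := by
    intro kk hkk
    rw [List.mem_range'] at hkk
    have hkn : kk < s.length := by omega
    rw [pvDiff_eq hs (by omega) (by omega) hkn]
    have := pvGet_mono hs (a := i + 2) (b := kk) (by omega) hkn
    unfold pvSpan; omega
  unfold pvInnerK
  rw [hlen, List.range'_succ, List.foldl_cons]
  by_cases h : 2 * pvSpan s i < m
  · rw [if_pos h]
    have hstep : pvStepK s i (i + 1) (some m, t) (i + 2) =
        (some (2 * pvSpan s i), [pvGet s i, pvGet s (i + 1), pvGet s (i + 2)]) := by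
      simp [pvStepK, hd, h]
    rw [hstep]
    exact foldK_const s i (i + 1) _ _ _ hge
  · rw [if_neg h]
    have hstep : pvStepK s i (i + 1) (some m, t) (i + 2) = (some m, t) := by
      simp [pvStepK, hd, h]
    rw [hstep]
    refine foldK_const s i (i + 1) _ _ _ (fun kk hkk => ?_)
    have := hge kk hkk; omega

-- pvInnerK at j = i+1 from the infinity state
theorem innerK_first_none {s : List Int} (hs : s.Pairwise (· ≤ ·)) {i : Nat}
    (hi : i + 2 < s.length) (t : List Int) :
    pvInnerK s i (i + 1) (none, t) =
      (some (2 * pvSpan s i), [pvGet s i, pvGet s (i + 1), pvGet s (i + 2)]) := by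
  have hlen : s.length - (i + 1 + 1) = (s.length - (i + 3)) + 1 := by omega
  have hd : pvDiff s i (i + 1) (i + 2) = 2 * pvSpan s i := by
    rw [pvDiff_eq hs (by omega) (by omega) hi]; rfl
  unfold pvInnerK
  rw [hlen, List.range'_succ, List.foldl_cons]
  have hstep : pvStepK s i (i + 1) (none, t) (i + 2) =
      (some (2 * pvSpan s i), [pvGet s i, pvGet s (i + 1), pvGet s (i + 2)]) := by
    simp [pvStepK, hd]
  rw [hstep]
  refine foldK_const s i (i + 1) _ _ _ (fun kk hkk => ?_)
  rw [List.mem_range'] at hkk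
  have hkn : kk < s.length := by omega
  rw [pvDiff_eq hs (by omega) (by omega) hkn]
  have := pvGet_mono hs (a := i + 2) (b := kk) (by omega) hkn
  unfold pvSpan; omega

-- the j-loop over any tail of j's ≥ i+2 never updates
theorem foldJ_const {s : List Int} (hs : s.Pairwise (· ≤ ·)) (i : Nat) (J : List Nat)
    (hJ : ∀ j ∈ J, i + 2 ≤ j) (m : Int) (t : List Int) (hm : m ≤ 2 * pvSpan s i) :
    J.foldl (fun st j => pvInnerK s i j st) (some m, t) = (some m, t) := by
  induction J with
  | nil => rfl
  | cons j J ih =>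
      have hj := hJ j (by simp)
      have hK : pvInnerK s i j (some m, t) = (some m, t) := by
        refine foldK_const s i j _ _ _ (fun kk hkk => ?_)
        rw [List.mem_range'] at hkk
        have hkn : kk < s.length := by omega
        rw [pvDiff_eq hs (by omega) (by omega) hkn]
        have h2 : i + 2 < s.length := by omega
        have := pvGet_mono hs (a := i + 2) (b := kk) (by omega) hkn
        simp only [pvSpan] at hm; omega
      simp only [List.foldl_cons, hK]
      exact ih (fun j hj => hJ j (by simp [hj]))

-- full collapse of the two inner loops for one i, some-state
theorem collapseJ_some {s : List Int} (hs : s.Pairwise (· ≤ ·)) {i : Nat}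
    (hi : i + 2 < s.length) (m : Int) (t : List Int) :
    pvInnerJ s i (some m, t) =
      if 2 * pvSpan s i < m then
        (some (2 * pvSpan s i), [pvGet s i, pvGet s (i + 1), pvGet s (i + 2)])
      else (some m, t) := by
  have hlen : s.length - 1 - (i + 1) = (s.length - (i + 3)) + 1 := by omega
  unfold pvInnerJ
  rw [hlen, List.range'_succ, List.foldl_cons, innerK_first hs hi m t]
  by_cases h : 2 * pvSpan s i < m
  · rw [if_pos h]
    refine foldJ_const hs i _ (fun j hj => ?_) _ _ (le_refl _)
    rw [List.mem_range'] at hj; omega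
  · rw [if_neg h]
    refine foldJ_const hs i _ (fun j hj => ?_) _ _ (by omega)
    rw [List.mem_range'] at hj; omega

-- full collapse for one i, infinity-state
theorem collapseJ_none {s : List Int} (hs : s.Pairwise (· ≤ ·)) {i : Nat}
    (hi : i + 2 < s.length) (t : List Int) :
    pvInnerJ s i (none, t) =
      (some (2 * pvSpan s i), [pvGet s i, pvGet s (i + 1), pvGet s (i + 2)]) := by
  have hlen : s.length - 1 - (i + 1) = (s.length - (i + 3)) + 1 := by omega
  unfold pvInnerJ
  rw [hlen, List.range'_succ, List.foldl_cons, innerK_first_none hs hi t]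
  refine foldJ_const hs i _ (fun j hj => ?_) _ _ (le_refl _)
  rw [List.mem_range'] at hj; omega

-- A's outer loop simulates B's window scan
theorem outer_sim {s : List Int} (hs : s.Pairwise (· ≤ ·)) (L : List Nat)
    (hL : ∀ i ∈ L, i + 2 < s.length) (b : Int × Nat) (hb : b.1 = pvSpan s b.2) :
    L.foldl (fun st i => pvInnerJ s i st)
        (some (2 * b.1), [pvGet s b.2, pvGet s (b.2 + 1), pvGet s (b.2 + 2)]) =
      (some (2 * (L.foldl (pvStepB s) b).1),
        [pvGet s (L.foldl (pvStepB s) b).2, pvGet s ((L.foldl (pvStepB s) b).2 + 1),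
          pvGet s ((L.foldl (pvStepB s) b).2 + 2)]) := by
  induction L generalizing b with
  | nil => simp
  | cons i L ih =>
      have hi := hL i (by simp)
      simp only [List.foldl_cons]
      rw [collapseJ_some hs hi]
      by_cases h : pvSpan s i < b.1
      · rw [if_pos (by omega), show pvStepB s b i = (pvSpan s i, i) by simp [pvStepB, h]]
        exact ih (fun i hi => hL i (by simp [hi])) (pvSpan s i, i) rfl
      · rw [if_neg (by omega), show pvStepB s b i = b by simp [pvStepB, h]]
        exact ih (fun i hi => hL i (by simp [hi])) b hb

theorem main_aux (s : List Int) (hs : s.Pairwise (· ≤ ·)) (hn : 3 ≤ s.length) :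
    ((List.range (s.length - 2)).foldl (fun st i => pvInnerJ s i st)
        (none, [pvGet s 0, pvGet s 1, pvGet s 2])).2 =
      [pvGet s ((List.range' 1 (s.length - 2 - 1)).foldl (pvStepB s) (pvSpan s 0, 0)).2,
        pvGet s (((List.range' 1 (s.length - 2 - 1)).foldl (pvStepB s) (pvSpan s 0, 0)).2 + 1),
        pvGet s (((List.range' 1 (s.length - 2 - 1)).foldl (pvStepB s) (pvSpan s 0, 0)).2 + 2)] := by
  have h2 : s.length - 2 = (s.length - 3) + 1 := by omega

  rw [h2, Nat.add_sub_cancel, List.range_eq_range', List.range'_succ, List.foldl_cons,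
    collapseJ_none hs (by omega)]
  rw [outer_sim hs _ (fun i hi => by rw [List.mem_range'] at hi; omega) (pvSpan s 0, 0) rfl]

theorem find_nearest_indices_spec : Claim_equal_find_nearest_indices := by
  intro data _ hpre
  unfold Spec_find_nearest_indices find_nearest_indices find_nearest_indices_alt
  have hs : (PySem.List.sorted data (fun x => x) false).Pairwise (· ≤ ·) := by
    simpa using PySem.List.sorted_pairwise (xs := data) (key := fun x => x)
  have hn : 3 ≤ (PySem.List.sorted data (fun x => x) false).length := by
    rw [PySem.List.length_sorted]; exact hpre
  exact main_aux _ hs hn
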